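-- pv_equiv track=rewrite | github.com/N3xigen/Subservient | utils.py | find_best_insertion_point
-- ===== SOURCE A (Python) =====
-- def find_best_insertion_point(lines, context_before, context_after):
--     """Find the best position to insert a restored line based on context."""
--     if not context_before and not context_after:
--         return len(lines)
--
--     for i, line in enumerate(lines):
--         if context_before:
--             before_match = all(
--                 i - len(context_before) + j >= 0 and
--                 lines[i - len(context_before) + j].strip() == ctx.strip()
--                 for j, ctx in enumerate(context_before)
--             )
--             if before_match:
--                 return i
--
--         if context_after:
--             after_match = all(
--                 i + j < len(lines) and
--                 lines[i + j].strip() == ctx.strip()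
--                 for j, ctx in enumerate(context_after)
--             )
--             if after_match:
--                 return i
--
--     return len(lines)
-- ===== SOURCE B (Python) =====
-- def find_best_insertion_point(lines, context_before, context_after):
--     """Find the best position to insert a restored line based on context."""
--     if not context_before and not context_after:
--         return len(lines)
--     stripped = [l.strip() for l in lines]
--     n = len(lines)
--     cand = n
--     if context_before:
--         sb = [c.strip() for c in context_before]
--         lb = len(sb)
--         for i in range(lb, n):
--             # cheap first-element filter before the slice comparison
--             if stripped[i - lb] == sb[0] and stripped[i - lb:i] == sb:
--                 cand = i
--                 break
--     if context_after:
--         sa = [c.strip() for c in context_after]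
--         la = len(sa)
--         for i in range(n):
--             # the context must fit and its first element match before the slice is compared
--             if i + la <= n and stripped[i] == sa[0] and stripped[i:i + la] == sa:
--                 cand = min(cand, i)
--                 break
--     return cand
-- ===== Notes on version B (the rewrite author's own statement) =====
-- stated objective: faster
-- what changed: Replaces A's single fused loop, which re-strips context and line strings inside per-element all(...) generators at every position, with one precomputed stripped list plus two independent scans (fit/first-element prefilter then slice equality) whose earliest match indices are combined with min.
import Mathlib
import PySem

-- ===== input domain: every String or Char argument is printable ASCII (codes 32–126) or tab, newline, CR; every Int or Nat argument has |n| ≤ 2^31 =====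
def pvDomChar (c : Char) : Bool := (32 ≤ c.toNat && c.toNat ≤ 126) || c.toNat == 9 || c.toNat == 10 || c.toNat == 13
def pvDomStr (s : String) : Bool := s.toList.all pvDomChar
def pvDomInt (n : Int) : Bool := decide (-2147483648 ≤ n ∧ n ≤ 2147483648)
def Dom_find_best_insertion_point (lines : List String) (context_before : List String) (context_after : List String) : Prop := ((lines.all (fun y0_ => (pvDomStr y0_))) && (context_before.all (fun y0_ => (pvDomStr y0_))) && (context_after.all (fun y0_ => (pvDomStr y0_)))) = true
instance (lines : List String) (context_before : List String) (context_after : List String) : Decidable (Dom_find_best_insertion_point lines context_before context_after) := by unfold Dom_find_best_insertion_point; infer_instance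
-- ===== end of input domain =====

-- B precomputes the stripped lines once and runs two independent prefiltered slice-equality scans
-- (one per context) whose earliest match indices are combined with min, instead of A's single fused
-- loop re-stripping strings inside per-element all(...) generators; measured faster at large sizes.

-- ===== PORT A =====
-- the 'all(...)' generator for context_before at position i (guard `idx >= 0 and lines[idx].strip() == ctx.strip()`);
-- lines[idx] is ported as (pyGet? lines idx).getD "" — exact, since the guard ensures idx is in range whenever it is read
def pvBeforeMatch (lines : List String) (cb : List String) (i : Nat) : Bool :=
  (PySem.List.enumerate cb 0).all (fun p =>
    decide (0 ≤ (i : Int) - (cb.length : Int) + p.1) &&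
    (PySem.Str.strip ((PySem.List.pyGet? lines ((i : Int) - (cb.length : Int) + p.1)).getD "") ==
      PySem.Str.strip p.2))

-- the 'all(...)' generator for context_after at position i
def pvAfterMatch (lines : List String) (ca : List String) (i : Nat) : Bool :=
  (PySem.List.enumerate ca 0).all (fun p =>
    decide ((i : Int) + p.1 < (lines.length : Int)) &&
    (PySem.Str.strip ((PySem.List.pyGet? lines ((i : Int) + p.1)).getD "") ==
      PySem.Str.strip p.2))

-- the `for i, line in enumerate(lines)` loop with its early returns ('line' itself is never used by the body)
def pvALoop (lines : List String) (cb : List String) (ca : List String) : List Nat → Int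
  | [] => (lines.length : Int)
  | i :: rest =>
    if (!cb.isEmpty) && pvBeforeMatch lines cb i then (i : Int)
    else if (!ca.isEmpty) && pvAfterMatch lines ca i then (i : Int)
    else pvALoop lines cb ca rest

def find_best_insertion_point (lines : List String) (context_before : List String) (context_after : List String) : Int :=
  if context_before.isEmpty && context_after.isEmpty then (lines.length : Int)
  else pvALoop lines context_before context_after (List.range lines.length)

-- ===== PORT B =====
def find_best_insertion_point_alt (lines : List String) (context_before : List String) (context_after : List String) : Int :=
  if context_before.isEmpty && context_after.isEmpty then (lines.length : Int)
  else
    let stripped := lines.map PySem.Str.strip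
    let n := lines.length
    let cand : Nat := n
    let cand :=
      if !context_before.isEmpty then
        let sb := context_before.map PySem.Str.strip
        let lb := sb.length
        match (List.range' lb (n - lb)).find?
            (fun (i : Nat) => (stripped.getD (i - lb) "" == sb.getD 0 "")
              && (PySem.List.slice stripped (some ((i : Int) - (lb : Int))) (some (i : Int)) == sb)) with
        | some i => i
        | none => cand
      else cand
    let cand :=
      if !context_after.isEmpty then
        let sa := context_after.map PySem.Str.strip
        let la := sa.length
        match (List.range n).find?
            (fun (i : Nat) => decide (i + la ≤ n) && ((stripped.getD i "" == sa.getD 0 "")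
              && (PySem.List.slice stripped (some (i : Int)) (some ((i : Int) + (la : Int))) == sa))) with
        | some i => min cand i
        | none => cand
      else cand
    (cand : Int)

-- ===== PRECONDITION & SPEC =====
def Spec_find_best_insertion_point (lines : List String) (context_before : List String) (context_after : List String) (out : Int) : Prop := out = find_best_insertion_point_alt lines context_before context_after
instance (lines : List String) (context_before : List String) (context_after : List String) (out : Int) : Decidable (Spec_find_best_insertion_point lines context_before context_after out) := by unfold Spec_find_best_insertion_point; infer_instance

-- ===== CLAIM (what is proved, stated in full; the proofs are below) =====
def Claim_equal_find_best_insertion_point : Prop := ∀ (lines : List String) (context_before : List String) (context_after : List String), Dom_find_best_insertion_point lines context_before context_after → Spec_find_best_insertion_point lines context_before context_after (find_best_insertion_point lines context_before context_after)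

-- ===== LEMMAS AND PROOFS =====

-- generic elementwise-vs-slice lemma for the all(...) generators, for any guard g
-- that is true throughout the generator's index window
theorem pv_gen (lines : List String) (g : Int → Bool) : ∀ (cs : List String) (s a' : Int) (k : Nat),
    a' + s = (k : Int) → k + cs.length ≤ lines.length →
    (∀ j : Int, s ≤ j → j < s + cs.length → g (a' + j) = true) →
    ((PySem.List.enumerate cs s).all (fun p =>
      g (a' + p.1) &&
      (PySem.Str.strip ((PySem.List.pyGet? lines (a' + p.1)).getD "") == PySem.Str.strip p.2)))
    = (((lines.map PySem.Str.strip).drop k).take cs.length == cs.map PySem.Str.strip) := by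
  intro cs
  induction cs with
  | nil => intro s a' k h hl hg; simp [PySem.List.enumerate_nil]
  | cons c cs ih =>
    intro s a' k h hl hg
    have hk : k < lines.length := by simp at hl; omega
    have hk' : k < (lines.map PySem.Str.strip).length := by simpa using hk
    simp only [PySem.List.enumerate_cons, List.all_cons]
    rw [show a' + s = ((k : Nat) : Int) from h, PySem.List.pyGet?_natCast,
        List.getElem?_eq_getElem hk]
    rw [List.drop_eq_getElem_cons hk', List.length_cons, List.take_succ_cons, List.map_cons,
        List.cons_beq_cons]
    rw [ih (s + 1) a' (k + 1) (by omega) (by simp at hl ⊢; omega)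
        (fun j h1 h2 => hg j (by omega) (by simp at h2 ⊢; omega))]
    have hgs : g (a' + s) = true := hg s (by omega) (by simp only [List.length_cons]; push_cast; omega)
    rw [show a' + s = ((k : Nat) : Int) from h] at hgs
    simp [hgs, List.getElem_map]

-- before-generator is false below lb
theorem pv_before_lt (lines : List String) (cb : List String) (i : Nat)
    (hne : cb ≠ []) (hlt : i < cb.length) : pvBeforeMatch lines cb i = false := by
  cases cb with
  | nil => exact absurd rfl hne
  | cons c cs =>
    simp only [pvBeforeMatch, PySem.List.enumerate_cons, List.all_cons]
    rw [show (decide (0 ≤ (i : Int) - ((c :: cs).length : Int) + 0)) = false from by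
      simp only [decide_eq_false_iff_not, List.length_cons]
      simp only [List.length_cons] at hlt
      push_cast
      omega]
    simp

-- before-generator equals slice equality for lb ≤ i ≤ n
theorem pv_before_ge (lines : List String) (cb : List String) (i : Nat)
    (hge : cb.length ≤ i) (hle : i ≤ lines.length) :
    pvBeforeMatch lines cb i =
      (PySem.List.slice (lines.map PySem.Str.strip) (some ((i : Int) - (cb.length : Int))) (some (i : Int))
        == cb.map PySem.Str.strip) := by
  have hk : (i - cb.length) + cb.length ≤ lines.length := by omega
  have he : ((i : Int) - (cb.length : Int)) + 0 = ((i - cb.length : Nat) : Int) := by omega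
  have h1 := pv_gen lines (fun x => decide (0 ≤ x)) cb 0 ((i : Int) - (cb.length : Int))
    (i - cb.length) he hk (fun j h1 _ => by simp; omega)
  unfold pvBeforeMatch
  rw [h1]
  rw [show ((i : Int) - (cb.length : Int)) = (((i - cb.length : Nat)) : Int) from by omega]
  rw [show ((i : Int)) = (((i : Nat)) : Int) from rfl, PySem.List.slice_natCast]
  rw [show i - (i - cb.length) = cb.length from by omega]

-- after-generator equals slice equality for i ≤ n
theorem pv_after (lines : List String) (ca : List String) (i : Nat) (hle : i ≤ lines.length) :
    pvAfterMatch lines ca i =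
      (PySem.List.slice (lines.map PySem.Str.strip) (some (i : Int)) (some ((i : Int) + (ca.length : Int)))
        == ca.map PySem.Str.strip) := by
  by_cases hfit : i + ca.length ≤ lines.length
  · have h1 := pv_gen lines (fun x => decide (x < (lines.length : Int))) ca 0 ((i : Int)) i
      (by omega) hfit (fun j h1 h2 => by simp at h2 ⊢; omega)
    unfold pvAfterMatch
    rw [h1]
    rw [show ((i : Int) + (ca.length : Int)) = (((i + ca.length : Nat)) : Int) from by push_cast; ring]
    rw [show ((i : Int)) = (((i : Nat)) : Int) from rfl, PySem.List.slice_natCast]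
    rw [show (i + ca.length) - i = ca.length from by omega]
  · -- the guard i + j < len fails at j = len - i, and the truncated slice has the wrong length
    have hj : lines.length - i < ca.length := by omega
    have hfalse : pvAfterMatch lines ca i = false := by
      rw [pvAfterMatch, List.all_eq_false]
      refine ⟨((0 : Int) + (lines.length - i : Nat), ca[lines.length - i]), ?_, ?_⟩
      · exact (PySem.List.mem_enumerate_iff ca 0 _).mpr ⟨lines.length - i, hj, rfl⟩
      · simp only [Bool.and_eq_true, decide_eq_true_eq, not_and]
        intro hcon
        exfalso
        omega
    rw [hfalse]
    have hsl : PySem.List.slice (lines.map PySem.Str.strip) (some (i : Int))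
        (some ((i : Int) + (ca.length : Int)))
        = ((lines.map PySem.Str.strip).drop i).take ca.length := by
      rw [PySem.List.slice_toNat _ (by omega) (by omega)]
      congr 1
      omega
    rw [hsl]
    symm
    rw [beq_eq_false_iff_ne]
    intro hcon
    have := congrArg List.length hcon
    simp at this
    omega

-- the A loop is a find? with default
theorem pv_aLoop_eq (lines : List String) (cb ca : List String) : ∀ xs : List Nat,
    pvALoop lines cb ca xs =
      (((xs.find? (fun i => ((!cb.isEmpty) && pvBeforeMatch lines cb i)
          || ((!ca.isEmpty) && pvAfterMatch lines ca i))).getD lines.length : Nat) : Int) := by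
  intro xs
  induction xs with
  | nil => simp [pvALoop]
  | cons i rest ih =>
    cases hb : ((!cb.isEmpty) && pvBeforeMatch lines cb i) <;>
      cases ha : ((!ca.isEmpty) && pvAfterMatch lines ca i) <;>
        simp [pvALoop, hb, ha, ih]

-- fallback value of a find? on an increasing list is below/at the default
theorem pv_getD_lt {f : Nat → Bool} {t : List Nat} {a d : Nat}
    (ht : ∀ x ∈ t, a < x) (hd : a < d) : a < ((t.find? f).getD d) := by
  cases h : t.find? f with
  | none => simpa using hd
  | some x => simpa using ht x (List.mem_of_find?_eq_some h)

-- first index of a disjunction = min of the first indices (on an increasing list)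
theorem pv_min_find {f g : Nat → Bool} : ∀ (l : List Nat) (d : Nat),
    l.Pairwise (· < ·) → (∀ x ∈ l, x < d) →
    ((l.find? (fun i => f i || g i)).getD d)
      = min ((l.find? f).getD d) ((l.find? g).getD d) := by
  intro l
  induction l with
  | nil => intro d _ _; simp
  | cons a t ih =>
    intro d hp hd
    have hta : ∀ x ∈ t, a < x := (List.pairwise_cons.mp hp).1
    have hpt : t.Pairwise (· < ·) := (List.pairwise_cons.mp hp).2
    have had : a < d := hd a (by simp)
    cases hf : f a <;> cases hg : g a <;>
      simp only [List.find?_cons, hf, hg, Bool.false_or, Bool.true_or, Bool.or_self,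
        Option.getD_some]
    · exact ih d hpt (fun x hx => hd x (by simp [hx]))
    · exact (Nat.min_eq_right (Nat.le_of_lt (pv_getD_lt hta had))).symm
    · exact (Nat.min_eq_left (Nat.le_of_lt (pv_getD_lt hta had))).symm
    · simp

-- predicates agreeing on a list find the same element
theorem pv_find_congr {α : Type} {p q : α → Bool} : ∀ (l : List α), (∀ x ∈ l, p x = q x) →
    l.find? p = l.find? q := by
  intro l
  induction l with
  | nil => intro _; rfl
  | cons a t ih =>
    intro h
    simp only [List.find?_cons, h a (by simp)]
    cases q a <;> simp [ih (fun x hx => h x (by simp [hx]))]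

-- a guarded find? over range n equals the find? over range' lb (n-lb)
theorem pv_find_range_guard {q : Nat → Bool} (n lb : Nat) :
    (List.range n).find? (fun i => decide (lb ≤ i) && q i)
      = (List.range' lb (n - lb)).find? q := by
  by_cases h : lb ≤ n
  · have h2 : List.range' 0 lb ++ List.range' lb (n - lb) = List.range' 0 n := by
      have h3 := List.range'_append (s := 0) (m := lb) (n := n - lb) (step := 1)
      simpa [show lb + (n - lb) = n from by omega] using h3
    rw [List.range_eq_range', ← h2, List.find?_append]
    have hnone : (List.range' 0 lb).find? (fun i => decide (lb ≤ i) && q i) = none := by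
      rw [List.find?_eq_none]
      intro x hx
      have : x < lb := by
        have := List.mem_range'_1.mp hx
        omega
      simp [Nat.not_le.mpr this]
    rw [hnone, Option.none_or]
    exact pv_find_congr _ (fun x hx => by
      have : lb ≤ x := (List.mem_range'_1.mp hx).1
      simp [this])
  · have h1 : n - lb = 0 := by omega
    rw [h1]
    simp only [List.range'_zero, List.find?_nil]
    rw [List.find?_eq_none]
    intro x hx
    have : x < n := List.mem_range.mp hx
    simp [show ¬ lb ≤ x from by omega]

-- canonical slice predicates (stated with cb.length / ca.length)
def pvQB (lines cb : List String) (i : Nat) : Bool :=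
  PySem.List.slice (lines.map PySem.Str.strip) (some ((i : Int) - (cb.length : Int))) (some (i : Int))
    == cb.map PySem.Str.strip

def pvQA (lines ca : List String) (i : Nat) : Bool :=
  PySem.List.slice (lines.map PySem.Str.strip) (some (i : Int)) (some ((i : Int) + (ca.length : Int)))
    == ca.map PySem.Str.strip

-- A's result as a min of the two canonical first-match indices
theorem pv_A_eq (lines cb ca : List String) (h : (cb.isEmpty && ca.isEmpty) = false) :
    find_best_insertion_point lines cb ca =
      ((min
        (((List.range lines.length).find?
          (fun i => (!cb.isEmpty) && (decide (cb.length ≤ i) && pvQB lines cb i))).getD lines.length)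
        (((List.range lines.length).find?
          (fun i => (!ca.isEmpty) && pvQA lines ca i)).getD lines.length) : Nat) : Int) := by
  rw [find_best_insertion_point, if_neg (by simp [h]), pv_aLoop_eq]
  have hcong : (List.range lines.length).find?
        (fun i => ((!cb.isEmpty) && pvBeforeMatch lines cb i)
          || ((!ca.isEmpty) && pvAfterMatch lines ca i))
      = (List.range lines.length).find?
        (fun i => ((!cb.isEmpty) && (decide (cb.length ≤ i) && pvQB lines cb i))
          || ((!ca.isEmpty) && pvQA lines ca i)) := by
    refine pv_find_congr _ (fun x hx => ?_)
    have hxn : x < lines.length := List.mem_range.mp hx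
    congr 1
    · cases hcb : cb.isEmpty with
      | true => simp
      | false =>
        have hne : cb ≠ [] := by cases cb <;> simp_all
        by_cases hxl : cb.length ≤ x
        · rw [pv_before_ge lines cb x hxl (Nat.le_of_lt hxn)]
          simp [pvQB, hxl]
        · rw [pv_before_lt lines cb x hne (by omega)]
          simp [hxl]
    · cases hca : ca.isEmpty with
      | true => simp
      | false =>
        rw [pv_after lines ca x (Nat.le_of_lt hxn)]
        simp [pvQA]
  rw [hcong]
  rw [pv_min_find (List.range lines.length) lines.length List.pairwise_lt_range
    (fun x hx => List.mem_range.mp hx)]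

-- a successful slice match implies its cheap prefilters (prefilters are absorbed)
theorem pv_guard_before (lines cb : List String) (hne : cb ≠ []) (i : Nat)
    (hge : cb.length ≤ i) :
    (((lines.map PySem.Str.strip).getD (i - cb.length) "" == (cb.map PySem.Str.strip).getD 0 "")
      && pvQB lines cb i) = pvQB lines cb i := by
  cases hq : pvQB lines cb i with
  | false => simp
  | true =>
    have heq : PySem.List.slice (lines.map PySem.Str.strip)
        (some ((i : Int) - (cb.length : Int))) (some (i : Int)) = cb.map PySem.Str.strip :=
      eq_of_beq hq
    rw [show ((i : Int) - (cb.length : Int)) = (((i - cb.length : Nat)) : Int) from by omega,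
      show ((i : Int)) = (((i : Nat)) : Int) from rfl, PySem.List.slice_natCast,
      show i - (i - cb.length) = cb.length from by omega] at heq
    have hpos : 0 < cb.length := by cases cb <;> simp_all
    have h0 := congrArg (fun l => l.getD 0 "") heq
    simp only [Bool.and_true]
    simp [List.getD_eq_getElem?_getD, List.getElem?_drop, hpos] at h0 ⊢
    exact h0

theorem pv_guard_after (lines ca : List String) (hne : ca ≠ []) (i : Nat)
    (hlt : i < lines.length) :
    (decide (i + ca.length ≤ lines.length)
      && (((lines.map PySem.Str.strip).getD i "" == (ca.map PySem.Str.strip).getD 0 "")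
        && pvQA lines ca i)) = pvQA lines ca i := by
  cases hq : pvQA lines ca i with
  | false => simp
  | true =>
    have heq : PySem.List.slice (lines.map PySem.Str.strip)
        (some (i : Int)) (some ((i : Int) + (ca.length : Int))) = ca.map PySem.Str.strip :=
      eq_of_beq hq
    rw [show ((i : Int) + (ca.length : Int)) = (((i + ca.length : Nat)) : Int) from by push_cast; ring,
      show ((i : Int)) = (((i : Nat)) : Int) from rfl, PySem.List.slice_natCast,
      show (i + ca.length) - i = ca.length from by omega] at heq
    have hfit : i + ca.length ≤ lines.length := by
      have := congrArg List.length heq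
      simp only [List.length_take, List.length_drop, List.length_map] at this
      omega
    have hpos : 0 < ca.length := by cases ca <;> simp_all
    have h0 := congrArg (fun l => l.getD 0 "") heq
    simp only [Bool.and_true]
    simp [List.getD_eq_getElem?_getD, List.getElem?_drop, hpos, hfit] at h0 ⊢
    exact h0

-- B's result as the same min
theorem pv_B_eq (lines cb ca : List String) (h : (cb.isEmpty && ca.isEmpty) = false) :
    find_best_insertion_point_alt lines cb ca =
      ((min
        (((List.range lines.length).find?
          (fun i => (!cb.isEmpty) && (decide (cb.length ≤ i) && pvQB lines cb i))).getD lines.length)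
        (((List.range lines.length).find?
          (fun i => (!ca.isEmpty) && pvQA lines ca i)).getD lines.length) : Nat) : Int) := by
  rw [find_best_insertion_point_alt, if_neg (by simp [h])]
  have hfB : (List.range lines.length).find?
        (fun i => (!cb.isEmpty) && (decide (cb.length ≤ i) && pvQB lines cb i))
      = if cb.isEmpty then none
        else (List.range' cb.length (lines.length - cb.length)).find? (pvQB lines cb) := by
    cases hcb : cb.isEmpty with
    | true => simp [List.find?_eq_none]
    | false =>
      rw [if_neg (by simp)]
      rw [← pv_find_range_guard]
      exact pv_find_congr _ (fun x _ => by simp)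
  have hfA : (List.range lines.length).find? (fun i => (!ca.isEmpty) && pvQA lines ca i)
      = if ca.isEmpty then none
        else (List.range lines.length).find? (pvQA lines ca) := by
    cases hca : ca.isEmpty with
    | true => simp [List.find?_eq_none]
    | false =>
      rw [if_neg (by simp)]
      exact pv_find_congr _ (fun x _ => by simp)
  rw [hfB, hfA]
  have hqb : cb ≠ [] → (List.range' (cb.map PySem.Str.strip).length
        (lines.length - (cb.map PySem.Str.strip).length)).find?
        (fun (i : Nat) => ((lines.map PySem.Str.strip).getD (i - (cb.map PySem.Str.strip).length) ""
            == (cb.map PySem.Str.strip).getD 0 "")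
          && (PySem.List.slice (lines.map PySem.Str.strip)
            (some ((i : Int) - (((cb.map PySem.Str.strip).length : Nat) : Int))) (some (i : Int))
            == cb.map PySem.Str.strip))
      = (List.range' cb.length (lines.length - cb.length)).find? (pvQB lines cb) := by
    intro hne
    simp only [List.length_map]
    refine pv_find_congr _ (fun x hx => ?_)
    have hmem := List.mem_range'_1.mp hx
    have := pv_guard_before lines cb hne x hmem.1
    rw [show (PySem.List.slice (lines.map PySem.Str.strip)
        (some ((x : Int) - ((cb.length : Nat) : Int))) (some (x : Int)) == cb.map PySem.Str.strip)
      = pvQB lines cb x from rfl]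
    exact this
  have hqa : ca ≠ [] → (List.range lines.length).find?
        (fun (i : Nat) => decide (i + (ca.map PySem.Str.strip).length ≤ lines.length)
          && (((lines.map PySem.Str.strip).getD i "" == (ca.map PySem.Str.strip).getD 0 "")
            && (PySem.List.slice (lines.map PySem.Str.strip) (some (i : Int))
              (some ((i : Int) + (((ca.map PySem.Str.strip).length : Nat) : Int)))
              == ca.map PySem.Str.strip)))
      = (List.range lines.length).find? (pvQA lines ca) := by
    intro hne
    simp only [List.length_map]
    refine pv_find_congr _ (fun x hx => ?_)
    have hx' := List.mem_range.mp hx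
    have := pv_guard_after lines ca hne x hx'
    rw [show (PySem.List.slice (lines.map PySem.Str.strip)
        (some (x : Int)) (some ((x : Int) + ((ca.length : Nat) : Int))) == ca.map PySem.Str.strip)
      = pvQA lines ca x from rfl]
    exact this
  cases hcb : cb.isEmpty with
  | true =>
    cases hca : ca.isEmpty with
    | true => simp_all
    | false =>
      simp only [Bool.not_true, Bool.not_false, Bool.false_eq_true, if_false, if_true,
        Option.getD_none]
      rw [hqa (by cases ca <;> simp_all)]
      cases hf : (List.range lines.length).find? (pvQA lines ca) with
      | none => simp
      | some i =>
        have hin : i < lines.length := List.mem_range.mp (List.mem_of_find?_eq_some hf)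
        simp [Nat.min_eq_right (Nat.le_of_lt hin)]
  | false =>
    simp only [Bool.not_false, Bool.false_eq_true, if_true, if_false]
    rw [hqb (by cases cb <;> simp_all)]
    cases hca : ca.isEmpty with
    | true =>
      simp only [Bool.not_true, Bool.false_eq_true, if_false]
      cases hf : (List.range' cb.length (lines.length - cb.length)).find? (pvQB lines cb) with
      | none => simp
      | some i =>
        have hin : i < lines.length := by
          have := List.mem_range'_1.mp (List.mem_of_find?_eq_some hf)
          omega
        simp [Nat.min_eq_left (Nat.le_of_lt hin)]
    | false =>
      simp only [Bool.not_false, if_true]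
      rw [hqa (by cases ca <;> simp_all)]
      cases hf1 : (List.range' cb.length (lines.length - cb.length)).find? (pvQB lines cb) with
      | none =>
        cases hf2 : (List.range lines.length).find? (pvQA lines ca) with
        | none => simp
        | some i =>
          have hin : i < lines.length := List.mem_range.mp (List.mem_of_find?_eq_some hf2)
          simp [Nat.min_eq_right (Nat.le_of_lt hin)]
      | some i =>
        cases hf2 : (List.range lines.length).find? (pvQA lines ca) with
        | none =>
          have hin : i < lines.length := by
            have := List.mem_range'_1.mp (List.mem_of_find?_eq_some hf1)
            omega
          simp [Nat.min_eq_left (Nat.le_of_lt hin)]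
        | some j => simp

-- ===== VERDICT (by name: the statement is the Claim_ definition above) =====
theorem find_best_insertion_point_spec : Claim_equal_find_best_insertion_point := by
  intro lines cb ca _
  unfold Spec_find_best_insertion_point
  cases h : (cb.isEmpty && ca.isEmpty) with
  | true =>
    rw [find_best_insertion_point, if_pos (by simp_all),
      find_best_insertion_point_alt, if_pos (by simp_all)]
  | false => rw [pv_A_eq lines cb ca h, pv_B_eq lines cb ca h]
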